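-- pv_equiv track=rewrite | github.com/Roxamir/cs362_group14 | task.py | conv_endian
-- ===== SOURCE A (Python) =====
-- def conv_endian(num, endian='big'):
--     """
--     This function takes in an integer value as 'num' and converts it to a
--     hexadecimal number. Endian type is determined by the flag 'endian'.
--     """
--     hex_dict = {0: '0', 1: '1', 2: '2', 3: '3', 4: '4', 5: '5', 6: '6', 7: '7',
--                 8: '8', 9: '9', 10: 'A', 11: 'B', 12: 'C', 13: 'D', 14: 'E', 15: 'F'}
--     big_end_byte_arr = []
--     current_byte = ''
--     if num < 0:             # negative check
--         neg_flag = True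
--         dec_num = -num
--     else:
--         neg_flag = False
--         dec_num = num
--     while True:                                                         # loop till decimal is 0
--         current_byte = hex_dict[dec_num % 16] + current_byte
--         dec_num = dec_num//16
--         if len(current_byte) == 2:                                      # byte val found, wrap and reset byte container
--             big_end_byte_arr.insert(0, current_byte)
--             current_byte = ''
--         if dec_num < 16:                                                # end of num reached, save and break
--             current_byte = hex_dict[dec_num % 16] + current_byte
--             if len(current_byte) == 1:                                  # leading zero for byte
--                 current_byte = '0' + current_byte
--             big_end_byte_arr.insert(0, current_byte)
--             break
--
--     if endian == 'big':
--         hex_num = ' '.join(map(str, big_end_byte_arr))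
--     elif endian == 'little':
--         hex_num = ' '.join(map(str, big_end_byte_arr[::-1]))               # flip order on little endian
--     else:
--         raise Exception("Endian type can only be 'little' or 'big'.")
--
--     if neg_flag:
--         hex_num = '-' + hex_num
--     return hex_num
-- ===== SOURCE B (Python) =====
-- def conv_endian(num, endian='big'):
--     if endian != 'big' and endian != 'little':
--         raise Exception("Endian type can only be 'little' or 'big'.")
--     h = format(abs(num), 'X')
--     if len(h) % 2 == 1:
--         h = '0' + h
--     byte_arr = []
--     while h:
--         byte_arr.append(h[:2])
--         h = h[2:]
--     if endian == 'little':
--         byte_arr.reverse()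
--     s = ' '.join(byte_arr)
--     return '-' + s if num < 0 else s
-- ===== Notes on version B (the rewrite author's own statement) =====
-- stated objective: simpler
-- what changed: Replaces A's digit-by-digit div/mod loop that assembles bytes in a two-state accumulator with a direct hex conversion (format(abs(num),'X')), padded to even length and chunked into two-char bytes.
import Mathlib
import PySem

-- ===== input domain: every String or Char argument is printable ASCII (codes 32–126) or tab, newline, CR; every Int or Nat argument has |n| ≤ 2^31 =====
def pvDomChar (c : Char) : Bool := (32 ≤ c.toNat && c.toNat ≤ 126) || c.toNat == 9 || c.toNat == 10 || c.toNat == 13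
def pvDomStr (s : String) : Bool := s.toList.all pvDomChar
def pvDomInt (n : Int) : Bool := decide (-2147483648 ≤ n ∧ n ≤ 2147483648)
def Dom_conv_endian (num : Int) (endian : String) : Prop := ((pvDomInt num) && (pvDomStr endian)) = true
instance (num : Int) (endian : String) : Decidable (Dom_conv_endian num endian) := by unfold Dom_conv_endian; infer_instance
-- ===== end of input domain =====

-- B replaces A's digit-by-digit div/mod loop (two-state byte accumulator, front insertion)
-- by a direct hex conversion padded to even length and chunked into two-char bytes: simpler.

-- ===== PORT A =====
-- hex_dict lookup: hex_dict[n] for n = dec % 16 (always in range 0..15 here)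
def hexDig (n : Int) : Char :=
  if n = 0 then '0' else if n = 1 then '1' else if n = 2 then '2' else if n = 3 then '3'
  else if n = 4 then '4' else if n = 5 then '5' else if n = 6 then '6' else if n = 7 then '7'
  else if n = 8 then '8' else if n = 9 then '9' else if n = 10 then 'A' else if n = 11 then 'B'
  else if n = 12 then 'C' else if n = 13 then 'D' else if n = 14 then 'E' else if n = 15 then 'F'
  else ' '  -- KeyError, unreachable for dec % 16

-- the 'while True' loop; strings held as List Char; arr is big_end_byte_arr (insert(0,·) = cons)
def aLoop (dec : Int) (cur : List Char) (arr : List (List Char)) : List (List Char) :=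
  let cur1 := hexDig (PySem.Int.mod dec 16) :: cur
  let dec1 := PySem.Int.floordiv dec 16
  let st := if cur1.length = 2 then (([] : List Char), cur1 :: arr) else (cur1, arr)
  if _h : dec1 < 16 then
    let cur3 := hexDig (PySem.Int.mod dec1 16) :: st.1
    let cur4 := if cur3.length = 1 then '0' :: cur3 else cur3
    cur4 :: st.2
  else
    aLoop dec1 st.1 st.2
termination_by dec.toNat
decreasing_by
  have h16 : (16 : Int) ≤ PySem.Int.floordiv dec 16 := by omega
  have h256 : (256 : Int) ≤ dec := by
    have := (PySem.Int.le_floordiv_iff_mul_le (a := dec) (b := 16) (q := 16) (by norm_num)).mp h16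
    omega
  have hlt : PySem.Int.floordiv dec 16 < dec := by
    have := (PySem.Int.floordiv_lt_iff_lt_mul (a := dec) (b := 16) (q := dec) (by norm_num)).mpr
      (by nlinarith)
    exact this
  omega

def conv_endian (num : Int) (endian : String) : String :=
  let dec : Int := if num < 0 then -num else num
  let negFlag : Bool := num < 0
  let arr := aLoop dec [] []
  let hexNum : List Char :=
    if endian = "big" then PySem.Chars.join [' '] arr
    else if endian = "little" then PySem.Chars.join [' '] arr.reverse
    else []  -- raise Exception(...): excluded by Pre_conv_endian
  String.ofList (if negFlag then '-' :: hexNum else hexNum)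

-- ===== PORT B =====
-- format(n, 'X'): uppercase hex digits of n, most significant first
def digCharB (n : Nat) : Char := Char.ofNat (if n < 10 then 48 + n else 55 + n)

def hexDigitsB (n : Nat) : List Char :=
  if _h : n < 16 then [digCharB n] else hexDigitsB (n / 16) ++ [digCharB (n % 16)]
decreasing_by exact Nat.div_lt_self (by omega) (by norm_num)

-- 'while h: byte_arr.append(h[:2]); h = h[2:]'
def chunk2 : List Char → List (List Char)
  | [] => []
  | [a] => [[a]]
  | a :: b :: r => [a, b] :: chunk2 r

def conv_endian_alt (num : Int) (endian : String) : String :=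
  if endian ≠ "big" ∧ endian ≠ "little" then ""  -- raise: excluded by Pre_conv_endian
  else
    let h0 := hexDigitsB num.natAbs
    let h1 := if h0.length % 2 = 1 then '0' :: h0 else h0
    let bytes := chunk2 h1
    let bytes2 := if endian = "little" then bytes.reverse else bytes
    let s := PySem.Chars.join [' '] bytes2
    String.ofList (if num < 0 then '-' :: s else s)

-- ===== PRECONDITION & SPEC =====
-- Pre_ excludes exactly the endian values on which A raises Exception("Endian type can only be 'little' or 'big'.")
def Pre_conv_endian (num : Int) (endian : String) : Prop := endian = "big" ∨ endian = "little"
instance (num : Int) (endian : String) : Decidable (Pre_conv_endian num endian) := by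
  unfold Pre_conv_endian; infer_instance

def pvWitness_conv_endian : Int × String := (300, "big")

def Spec_conv_endian (num : Int) (endian : String) (out : String) : Prop := out = conv_endian_alt num endian
instance (num : Int) (endian : String) (out : String) : Decidable (Spec_conv_endian num endian out) := by unfold Spec_conv_endian; infer_instance

-- ===== CLAIM (what is proved, stated in full; the proofs are below) =====
def Claim_equal_conv_endian : Prop := ∀ (num : Int) (endian : String), Dom_conv_endian num endian → Pre_conv_endian num endian → Spec_conv_endian num endian (conv_endian num endian)

-- ===== LEMMAS AND PROOFS =====

-- B's padding + chunking of a digit list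
def bytesOf (ds : List Char) : List (List Char) :=
  chunk2 (if ds.length % 2 = 1 then '0' :: ds else ds)

lemma hexDig_eq_digCharB (n : Nat) (h : n < 16) : hexDig (n : Int) = digCharB n := by
  interval_cases n <;> rfl

lemma mod_cast16 (d : Nat) : PySem.Int.mod (d : Int) 16 = ((d % 16 : Nat) : Int) := by
  rw [PySem.Int.mod_eq_emod_of_pos (by norm_num)]
  omega

lemma floordiv_cast16 (d : Nat) : PySem.Int.floordiv (d : Int) 16 = ((d / 16 : Nat) : Int) := by
  rw [PySem.Int.floordiv_eq_ediv_of_pos (by norm_num)]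
  omega

lemma chunk2_append_even (l m : List Char) (h : l.length % 2 = 0) :
    chunk2 (l ++ m) = chunk2 l ++ chunk2 m := by
  induction l using chunk2.induct with
  | case1 => simp [chunk2]
  | case2 a => simp at h
  | case3 a b r ih => simp only [List.cons_append, chunk2, List.length_cons] at h ⊢; exact congrArg _ (ih (by omega))

lemma pad_even (ds : List Char) :
    (if ds.length % 2 = 1 then '0' :: ds else ds).length % 2 = 0 := by
  split <;> rename_i h
  · simp only [List.length_cons]; omega
  · omega

lemma bytesOf_snoc2 (l : List Char) (x y : Char) :
    bytesOf (l ++ [x, y]) = bytesOf l ++ [[x, y]] := by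
  unfold bytesOf
  have hpar : (l ++ [x, y]).length % 2 = l.length % 2 := by
    simp only [List.length_append, List.length_cons, List.length_nil]; omega
  by_cases h : l.length % 2 = 1
  · rw [if_pos (by rw [hpar]; exact h), if_pos h]
    have : '0' :: (l ++ [x, y]) = ('0' :: l) ++ [x, y] := by simp
    rw [this, chunk2_append_even _ _ (by have := pad_even l; rw [if_pos h] at this; exact this)]
    rfl
  · rw [if_neg (by rw [hpar]; exact h), if_neg h]
    rw [chunk2_append_even _ _ (by omega)]
    rfl

lemma hexDigitsB_large (d : Nat) (h : ¬ d < 16) :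
    hexDigitsB d = hexDigitsB (d / 16) ++ [digCharB (d % 16)] := by
  rw [hexDigitsB]; simp [h]

-- the main loop invariant: A's loop computes B's padded chunking
lemma aLoop_spec (d : Nat) :
    (∀ arr, aLoop (d : Int) [] arr = bytesOf (hexDigitsB d) ++ arr) ∧
    (16 ≤ d → ∀ c arr, aLoop (d : Int) [c] arr = bytesOf (hexDigitsB d ++ [c]) ++ arr) := by
  induction d using Nat.strong_induction_on with
  | _ d ih =>
    have hmod := mod_cast16 d
    have hdiv := floordiv_cast16 d
    have hdig : hexDig (((d % 16 : Nat) : Int)) = digCharB (d % 16) :=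
      hexDig_eq_digCharB _ (Nat.mod_lt _ (by norm_num))
    constructor
    · intro arr
      rw [aLoop]
      simp only [hmod, hdiv, hdig, List.length_cons, List.length_nil, Nat.reduceAdd]
      rw [if_neg (by omega : ¬ (1:Nat) = 2)]
      by_cases hd16 : d < 16
      · -- single digit: final byte is ['0', dig d]
        have hq : d / 16 = 0 := Nat.div_eq_of_lt hd16
        have hm : d % 16 = d := Nat.mod_eq_of_lt hd16
        rw [hq, hm, dif_pos (by norm_num : ((0:Nat):Int) < 16)]
        have h0 : hexDig (PySem.Int.mod ((0:Nat) : Int) 16) = '0' := rfl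
        rw [h0]
        simp only [List.length_cons, List.length_nil, Nat.reduceAdd]
        rw [hexDigitsB]
        simp [bytesOf, hd16, chunk2]
      · have hq1 : 1 ≤ d / 16 := (Nat.one_le_div_iff (by norm_num)).mpr (by omega)
        by_cases hq16 : d / 16 < 16
        · -- two digits: one even byte [dig (d/16), dig (d%16)]
          rw [dif_pos (by exact_mod_cast hq16)]
          rw [mod_cast16 (d/16), Nat.mod_eq_of_lt hq16, hexDig_eq_digCharB _ hq16]
          simp only [List.length_cons, List.length_nil, Nat.reduceAdd]
          rw [hexDigitsB_large d hd16, hexDigitsB]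
          simp [hq16, bytesOf, chunk2]
        · -- recurse with cur = [dig (d % 16)]
          rw [dif_neg (by exact_mod_cast hq16)]
          have := (ih (d / 16) (Nat.div_lt_self (by omega) (by norm_num))).2 (by omega)
            (digCharB (d % 16)) arr
          rw [this, hexDigitsB_large d hd16]
    · intro hd16 c arr
      rw [aLoop]
      simp only [hmod, hdiv, hdig, List.length_cons, List.length_nil, Nat.reduceAdd]
      simp only [if_true]
      have hq1 : 1 ≤ d / 16 := (Nat.one_le_div_iff (by norm_num)).mpr (by omega)
      by_cases hq16 : d / 16 < 16
      · -- last step: bytes ['0', dig (d/16)] and [dig (d%16), c]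
        rw [dif_pos (by exact_mod_cast hq16)]
        rw [mod_cast16 (d/16), Nat.mod_eq_of_lt hq16, hexDig_eq_digCharB _ hq16]
        rw [hexDigitsB_large d (by omega), hexDigitsB]
        simp [hq16, bytesOf, chunk2]
      · -- recurse with cur = [], byte [dig (d%16), c] already pushed
        rw [dif_neg (by exact_mod_cast hq16)]
        have := (ih (d / 16) (Nat.div_lt_self (by omega) (by norm_num))).1
          ([digCharB (d % 16), c] :: arr)
        simp only [this]
        rw [hexDigitsB_large d (by omega)]
        rw [show hexDigitsB (d / 16) ++ [digCharB (d % 16)] ++ [c]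
              = hexDigitsB (d / 16) ++ [digCharB (d % 16), c] by simp]
        rw [bytesOf_snoc2]
        simp

lemma conv_eq (num : Int) (endian : String) (hpre : endian = "big" ∨ endian = "little") :
    conv_endian num endian = conv_endian_alt num endian := by
  have hdec : (if num < 0 then -num else num) = ((num.natAbs : Nat) : Int) := by
    split <;> omega
  simp only [conv_endian, conv_endian_alt, hdec, (aLoop_spec num.natAbs).1 [],
    List.append_nil, bytesOf]
  rcases hpre with h | h <;> subst h <;> simp

-- ===== VERDICT (by name: the statement is the Claim_ definition above) =====
theorem conv_endian_spec : Claim_equal_conv_endian := by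
  intro num endian _ hpre
  unfold Spec_conv_endian
  exact conv_eq num endian hpre
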